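-- pv_equiv track=rewrite | github.com/sandeepseth5/experiment | python/largest_x_new.py | traverse_from_bottom_left
-- ===== SOURCE A (Python) =====
-- def traverse_from_bottom_left(matrix, bottom_left):
--     for i in range(len(matrix)-1, -1, -1):
--         for j in range(len(matrix[0])):
--             if i == len(matrix)-1 or j == 0:
--                 bottom_left[i][j] = matrix[i][j]
--             elif matrix[i][j] == 1 and bottom_left[i+1][j-1] > 0:
--                 bottom_left[i][j] = bottom_left[i+1][j-1] + 1
--             else:
--                 bottom_left[i][j] = matrix[i][j]
--     return bottom_left
-- ===== SOURCE B (Python) =====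
-- def traverse_from_bottom_left(matrix, bottom_left):
--     # Diagonal sweep: from each start cell on the bottom row or first column,
--     # walk up-right carrying the running value; mutates and returns bottom_left.
--     m = len(matrix)
--     if m == 0:
--         return bottom_left
--     c = len(matrix[0])
--     if c == 0:
--         return bottom_left
--     starts = [(m - 1, j0) for j0 in range(c)] + [(i0, 0) for i0 in range(m - 1)]
--     for (i0, j0) in starts:
--         prev = matrix[i0][j0]
--         bottom_left[i0][j0] = prev
--         i, j = i0 - 1, j0 + 1
--         while i >= 0 and j < c:
--             v = prev + 1 if matrix[i][j] == 1 and prev > 0 else matrix[i][j]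
--             bottom_left[i][j] = v
--             prev = v
--             i, j = i - 1, j + 1
--     return bottom_left
-- ===== Notes on version B (the rewrite author's own statement) =====
-- stated objective: alternative
-- what changed: Replaces A's row-by-row bottom-up DP (which rereads the partially filled bottom_left for each cell) with independent up-right diagonal walks started from the bottom row and first column, each carrying the running value in a scalar accumulator so the output array is never read back.
import Mathlib
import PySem

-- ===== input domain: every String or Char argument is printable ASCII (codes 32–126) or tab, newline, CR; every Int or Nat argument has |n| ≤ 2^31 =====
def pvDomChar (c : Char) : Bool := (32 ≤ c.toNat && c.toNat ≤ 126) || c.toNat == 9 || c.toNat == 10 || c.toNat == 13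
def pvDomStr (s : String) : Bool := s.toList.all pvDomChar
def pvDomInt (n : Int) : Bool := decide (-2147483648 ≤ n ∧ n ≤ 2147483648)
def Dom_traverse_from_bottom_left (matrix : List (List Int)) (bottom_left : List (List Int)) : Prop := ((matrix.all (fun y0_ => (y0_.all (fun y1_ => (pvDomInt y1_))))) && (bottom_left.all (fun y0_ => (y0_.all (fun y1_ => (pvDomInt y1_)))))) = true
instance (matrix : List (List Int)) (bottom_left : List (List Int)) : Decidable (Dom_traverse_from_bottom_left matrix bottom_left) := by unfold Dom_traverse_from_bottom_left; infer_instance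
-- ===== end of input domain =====

-- B replaces A's row-by-row bottom-up DP with independent up-right diagonal walks carrying the
-- running value in a scalar; equivalence is about the RETURN value only (both Pythons mutate
-- bottom_left in place and return it).

-- Shared 2D read/write helpers (Python's g[i][j] read and g[i][j]=v write, in-range under Pre_).
def pvGet2 (g : List (List Int)) (i j : Nat) : Int := (g.getD i []).getD j 0
def pvSet2 (g : List (List Int)) (i j : Nat) (v : Int) : List (List Int) :=
  g.set i ((g.getD i []).set j v)

-- ===== PORT A =====
def pvBodyA (matrix : List (List Int)) (m i : Nat) (bl : List (List Int)) (j : Nat) : List (List Int) :=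
  if i = m - 1 ∨ j = 0 then pvSet2 bl i j (pvGet2 matrix i j)
  else if pvGet2 matrix i j = 1 ∧ 0 < pvGet2 bl (i+1) (j-1) then
    pvSet2 bl i j (pvGet2 bl (i+1) (j-1) + 1)
  else pvSet2 bl i j (pvGet2 matrix i j)

def pvRowA (matrix : List (List Int)) (m c : Nat) (bl : List (List Int)) (i : Nat) : List (List Int) :=
  (List.range c).foldl (pvBodyA matrix m i) bl

def traverse_from_bottom_left (matrix : List (List Int)) (bottom_left : List (List Int)) : List (List Int) :=
  (List.range matrix.length).reverse.foldl
    (pvRowA matrix matrix.length (matrix.headD []).length) bottom_left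

-- ===== PORT B =====
def pvWalkUp (matrix : List (List Int)) (c : Nat) : Nat → Nat → Int → List (List Int) → List (List Int)
  | i, j, prev, bl =>
    if j < c then
      let v := if pvGet2 matrix i j = 1 ∧ 0 < prev then prev + 1 else pvGet2 matrix i j
      let bl' := pvSet2 bl i j v
      match i with
      | 0 => bl'
      | i'+1 => pvWalkUp matrix c i' (j+1) v bl'
    else bl

def pvStartWalk (matrix : List (List Int)) (c : Nat) (bl : List (List Int)) (i0 j0 : Nat) : List (List Int) :=
  let prev := pvGet2 matrix i0 j0
  let bl' := pvSet2 bl i0 j0 prev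
  match i0 with
  | 0 => bl'
  | i+1 => pvWalkUp matrix c i (j0+1) prev bl'

def traverse_from_bottom_left_alt (matrix : List (List Int)) (bottom_left : List (List Int)) : List (List Int) :=
  let m := matrix.length
  if m = 0 then bottom_left
  else
    let c := (matrix.headD []).length
    if c = 0 then bottom_left
    else
      let bl1 := (List.range c).foldl (fun bl j0 => pvStartWalk matrix c bl (m-1) j0) bottom_left
      (List.range (m-1)).foldl (fun bl i0 => pvStartWalk matrix c bl i0 0) bl1

-- ===== PRECONDITION & SPEC =====
-- Pre_ is exactly where Python A returns without raising: unless the loops are empty (no rows,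
-- or len(matrix[0]) = 0), every matrix row and every written bottom_left row must have at least
-- len(matrix[0]) columns, and bottom_left at least len(matrix) rows.
def Pre_traverse_from_bottom_left (matrix : List (List Int)) (bottom_left : List (List Int)) : Prop :=
  matrix = [] ∨ (matrix.headD []).length = 0 ∨
  ((∀ row ∈ matrix, (matrix.headD []).length ≤ row.length) ∧
   matrix.length ≤ bottom_left.length ∧
   (∀ row ∈ bottom_left.take matrix.length, (matrix.headD []).length ≤ row.length))
instance (matrix : List (List Int)) (bottom_left : List (List Int)) : Decidable (Pre_traverse_from_bottom_left matrix bottom_left) := by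
  unfold Pre_traverse_from_bottom_left; infer_instance

def pvWitness_traverse_from_bottom_left : List (List Int) × List (List Int) :=
  ([[1, 0], [1, 1]], [[0, 0], [0, 0]])

def Spec_traverse_from_bottom_left (matrix : List (List Int)) (bottom_left : List (List Int)) (out : List (List Int)) : Prop := out = traverse_from_bottom_left_alt matrix bottom_left
instance (matrix : List (List Int)) (bottom_left : List (List Int)) (out : List (List Int)) : Decidable (Spec_traverse_from_bottom_left matrix bottom_left out) := by unfold Spec_traverse_from_bottom_left; infer_instance

-- ===== CLAIM (what is proved, stated in full; the proofs are below) =====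
def Claim_equal_traverse_from_bottom_left : Prop := ∀ (matrix : List (List Int)) (bottom_left : List (List Int)), Dom_traverse_from_bottom_left matrix bottom_left → Pre_traverse_from_bottom_left matrix bottom_left → Spec_traverse_from_bottom_left matrix bottom_left (traverse_from_bottom_left matrix bottom_left)

-- ===== LEMMAS AND PROOFS =====

-- Option-valued cell lookup and shape equality, the language of all invariants below.
def pvOg (g : List (List Int)) (i j : Nat) : Option Int := g[i]?.bind (fun (row : List Int) => row[j]?)

def pvShapeEq (g1 g2 : List (List Int)) : Prop :=
  g1.length = g2.length ∧ ∀ (i : Nat), g1[i]?.map List.length = g2[i]?.map List.length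

-- The common per-cell value: d = distance from the bottom row (row index is m-1-d).
def pvSpec (matrix : List (List Int)) (m : Nat) : Nat → Nat → Int
  | 0, j => pvGet2 matrix (m-1) j
  | d+1, j =>
    if j = 0 then pvGet2 matrix (m-1-(d+1)) 0
    else if pvGet2 matrix (m-1-(d+1)) j = 1 ∧ 0 < pvSpec matrix m d (j-1) then
      pvSpec matrix m d (j-1) + 1
    else pvGet2 matrix (m-1-(d+1)) j

theorem pvShapeEq_refl (g : List (List Int)) : pvShapeEq g g := ⟨rfl, fun _ => rfl⟩

theorem pvShapeEq_symm {g1 g2 : List (List Int)} (h : pvShapeEq g1 g2) : pvShapeEq g2 g1 :=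
  ⟨h.1.symm, fun i => (h.2 i).symm⟩

theorem pvShapeEq_trans {g1 g2 g3 : List (List Int)} (h1 : pvShapeEq g1 g2) (h2 : pvShapeEq g2 g3) : pvShapeEq g1 g3 :=
  ⟨h1.1.trans h2.1, fun i => (h1.2 i).trans (h2.2 i)⟩

theorem pvOg_set2 (g : List (List Int)) (i j : Nat) (v : Int) (i' j' : Nat) :
    pvOg (pvSet2 g i j v) i' j' =
      if i' = i ∧ j' = j ∧ (pvOg g i j).isSome then some v else pvOg g i' j' := by
  unfold pvOg pvSet2
  rw [List.getElem?_set]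
  by_cases hii : i = i'
  · subst hii
    by_cases hil : i < g.length
    · have hg : g[i]? = some g[i] := List.getElem?_eq_getElem hil
      have hgd : g.getD i [] = g[i] := by
        rw [List.getD_eq_getElem?_getD, hg]; rfl
      simp only [if_pos hil, hgd, hg, Option.bind_some, if_true, true_and]
      rw [List.getElem?_set]
      by_cases hjj : j = j'
      · subst hjj
        by_cases hjl : j < g[i].length
        · simp [hjl]
        · simp [hjl]
      · have hcond : ¬ (j' = j ∧ g[i][j]?.isSome = true) := fun h => hjj h.1.symm
        rw [if_neg hcond, if_neg hjj]
    · have hg : g[i]? = none := List.getElem?_eq_none (by omega)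
      simp [hil]
  · have hg' : ¬ i' = i := fun h => hii h.symm
    simp [hii, hg']

theorem pvShapeEq_set2 (g : List (List Int)) (i j : Nat) (v : Int) : pvShapeEq (pvSet2 g i j v) g := by
  refine ⟨by simp [pvSet2], fun i' => ?_⟩
  unfold pvSet2
  rw [List.getElem?_set]
  by_cases hii : i = i'
  · subst hii
    by_cases hil : i < g.length
    · have hg : g[i]? = some g[i] := List.getElem?_eq_getElem hil
      have hgd : g.getD i [] = g[i] := by
        rw [List.getD_eq_getElem?_getD, hg]; rfl
      simp [hil]
    · have hg : g[i]? = none := List.getElem?_eq_none (by omega)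
      simp [hil]
  · simp [hii]

theorem pvGet2_of_og {g : List (List Int)} {i j : Nat} {v : Int} (h : pvOg g i j = some v) :
    pvGet2 g i j = v := by
  unfold pvOg at h
  unfold pvGet2
  cases hg : g[i]? with
  | none => rw [hg] at h; simp at h
  | some row =>
    rw [hg] at h
    simp only [Option.bind_some] at h
    have h1 : g.getD i [] = row := by rw [List.getD_eq_getElem?_getD, hg]; rfl
    rw [h1, List.getD_eq_getElem?_getD, h]
    rfl

theorem pvIsSome_of_shape {g1 g2 : List (List Int)} (h : pvShapeEq g1 g2) (i j : Nat) :
    (pvOg g1 i j).isSome = (pvOg g2 i j).isSome := by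
  unfold pvOg
  have hlen := h.2 i
  cases h1 : g1[i]? with
  | none =>
    rw [h1] at hlen
    cases h2 : g2[i]? with
    | none => simp
    | some r2 => rw [h2] at hlen; simp at hlen
  | some r1 =>
    rw [h1] at hlen
    cases h2 : g2[i]? with
    | none => rw [h2] at hlen; simp at hlen
    | some r2 =>
      rw [h2] at hlen
      simp only [Option.map_some, Option.some.injEq] at hlen
      simp only [Option.bind_some]
      by_cases hj : j < r1.length
      · rw [List.getElem?_eq_getElem hj, List.getElem?_eq_getElem (by omega : j < r2.length)]
        rfl
      · rw [List.getElem?_eq_none (by omega), List.getElem?_eq_none (by omega)]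

theorem pvGrid_ext {g1 g2 : List (List Int)} (hs : pvShapeEq g1 g2)
    (h : ∀ i j, pvOg g1 i j = pvOg g2 i j) : g1 = g2 := by
  apply List.ext_getElem?
  intro i
  have hlen := hs.2 i
  cases h1 : g1[i]? with
  | none =>
    rw [h1] at hlen
    cases h2 : g2[i]? with
    | none => rfl
    | some r2 => rw [h2] at hlen; simp at hlen
  | some r1 =>
    rw [h1] at hlen
    cases h2 : g2[i]? with
    | none => rw [h2] at hlen; simp at hlen
    | some r2 =>
      rw [h2] at hlen
      simp only [Option.map_some, Option.some.injEq] at hlen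
      have : r1 = r2 := by
        apply List.ext_getElem?
        intro j
        have := h i j
        unfold pvOg at this
        rw [h1, h2] at this
        simpa using this
      rw [this]

theorem pvFoldl_const {α β : Type} (l : List β) (g : α) : l.foldl (fun b _ => b) g = g := by
  induction l generalizing g with
  | nil => rfl
  | cons x xs ih => exact ih g

-- ===== A-side characterization =====
theorem pvRowA_og (matrix bl0 : List (List Int)) (m c : Nat)
    (HP : ∀ i j, i < m → j < c → (pvOg bl0 i j).isSome = true)
    (k : Nat) (hk : k < m) (g : List (List Int)) (hsh : pvShapeEq g bl0)
    (hup : ∀ i j, k < i → i < m → j < c → pvOg g i j = some (pvSpec matrix m (m-1-i) j)) :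
    pvShapeEq (pvRowA matrix m c g k) bl0 ∧
    ∀ i j, pvOg (pvRowA matrix m c g k) i j =
      if i = k ∧ j < c then some (pvSpec matrix m (m-1-k) j) else pvOg g i j := by
  have key : ∀ n, n ≤ c → pvShapeEq ((List.range n).foldl (pvBodyA matrix m k) g) bl0 ∧
      ∀ i j, pvOg ((List.range n).foldl (pvBodyA matrix m k) g) i j =
        if i = k ∧ j < n then some (pvSpec matrix m (m-1-k) j) else pvOg g i j := by
    intro n
    induction n with
    | zero => exact fun _ => ⟨hsh, fun i j => by simp⟩
    | succ n ih =>
      intro hn1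
      obtain ⟨ihs, ihog⟩ := ih (by omega)
      rw [List.range_succ, List.foldl_append, List.foldl_cons, List.foldl_nil]
      set g' := (List.range n).foldl (pvBodyA matrix m k) g with hg'
      have hsome : (pvOg g' k n).isSome = true := by
        rw [pvIsSome_of_shape ihs]; exact HP k n hk (by omega)
      have hstep : pvBodyA matrix m k g' n = pvSet2 g' k n (pvSpec matrix m (m-1-k) n) := by
        unfold pvBodyA
        by_cases hkm : k = m - 1
        · have hd : m - 1 - k = 0 := by omega
          rw [if_pos (Or.inl hkm), hd]
          rw [show pvSpec matrix m 0 n = pvGet2 matrix (m-1) n from rfl]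
          rw [hkm]
        · have hd : m - 1 - k = (m - 1 - k - 1) + 1 := by omega
          by_cases hn0 : n = 0
          · rw [if_pos (Or.inr hn0), hd]
            subst hn0
            rw [show pvSpec matrix m (m-1-k-1+1) 0 = pvGet2 matrix (m-1-(m-1-k-1+1)) 0 from rfl]
            congr 2
            omega
          · rw [if_neg (by tauto)]
            have hread : pvOg g' (k+1) (n-1) = some (pvSpec matrix m (m-1-(k+1)) (n-1)) := by
              rw [ihog]
              rw [if_neg (by omega)]
              exact hup (k+1) (n-1) (by omega) (by omega) (by omega)
            have hget : pvGet2 g' (k+1) (n-1) = pvSpec matrix m (m-1-(k+1)) (n-1) :=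
              pvGet2_of_og hread
            rw [hget, hd]
            have hidx : m - 1 - (m-1-k-1+1) = k := by omega
            have hd2 : m - 1 - k - 1 = m - 1 - (k+1) := by omega
            rw [show pvSpec matrix m (m-1-k-1+1) n =
              (if n = 0 then pvGet2 matrix (m-1-(m-1-k-1+1)) 0
               else if pvGet2 matrix (m-1-(m-1-k-1+1)) n = 1 ∧ 0 < pvSpec matrix m (m-1-k-1) (n-1) then
                 pvSpec matrix m (m-1-k-1) (n-1) + 1
               else pvGet2 matrix (m-1-(m-1-k-1+1)) n) from rfl]
            rw [if_neg hn0, hidx, hd2]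
            split_ifs with h1 <;> rfl
      rw [hstep]
      refine ⟨pvShapeEq_trans (pvShapeEq_set2 _ _ _ _) ihs, fun i j => ?_⟩
      rw [pvOg_set2]
      simp only [hsome, and_true]
      rw [ihog]
      by_cases hik : i = k
      · subst hik
        by_cases hjn : j = n
        · subst hjn; simp
        · by_cases hjl : j < n
          · simp [hjn, hjl, show j < n+1 by omega]
          · simp [hjn, hjl, show ¬ j < n+1 by omega]
      · simp [hik]
  obtain ⟨hs, hog⟩ := key c le_rfl
  exact ⟨hs, hog⟩

theorem pvA_og (matrix bl0 : List (List Int)) (m c : Nat)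
    (HP : ∀ i j, i < m → j < c → (pvOg bl0 i j).isSome = true)
    (k : Nat) (hk : k ≤ m) (g : List (List Int)) (hsh : pvShapeEq g bl0)
    (hup : ∀ i j, k ≤ i → i < m → j < c → pvOg g i j = some (pvSpec matrix m (m-1-i) j)) :
    pvShapeEq ((List.range k).reverse.foldl (pvRowA matrix m c) g) bl0 ∧
    ∀ i j, pvOg ((List.range k).reverse.foldl (pvRowA matrix m c) g) i j =
      if i < k ∧ j < c then some (pvSpec matrix m (m-1-i) j) else pvOg g i j := by
  induction k generalizing g with
  | zero => exact ⟨hsh, fun i j => by simp⟩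
  | succ k ih =>
    have hrange : (List.range (k+1)).reverse = k :: (List.range k).reverse := by
      rw [List.range_succ, List.reverse_append]; rfl
    rw [hrange, List.foldl_cons]
    obtain ⟨h1s, h1og⟩ := pvRowA_og matrix bl0 m c HP k (by omega) g hsh
      (fun i j hki him hjc => hup i j (by omega) him hjc)
    set g1 := pvRowA matrix m c g k with hg1
    have hup1 : ∀ i j, k ≤ i → i < m → j < c → pvOg g1 i j = some (pvSpec matrix m (m-1-i) j) := by
      intro i j hki him hjc
      rw [h1og]
      by_cases hik : i = k
      · subst hik; simp [hjc]
      · rw [if_neg (by tauto)]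
        exact hup i j (by omega) him hjc
    obtain ⟨h2s, h2og⟩ := ih (by omega) g1 h1s hup1
    refine ⟨h2s, fun i j => ?_⟩
    rw [h2og, h1og]
    by_cases hik : i = k
    · subst hik
      by_cases hjc : j < c
      · simp [hjc]
      · simp [hjc]
    · by_cases hikl : i < k
      · simp [hikl, hik, show i < k + 1 by omega]
      · simp [hikl, hik, show ¬ i < k + 1 by omega]

-- ===== B-side characterization =====
theorem pvVal_spec (matrix : List (List Int)) (m i j : Nat) (prev : Int)
    (him : i + 1 < m) (hj1 : 1 ≤ j)
    (hprev : prev = pvSpec matrix m (m-1-(i+1)) (j-1)) :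
    (if pvGet2 matrix i j = 1 ∧ 0 < prev then prev + 1 else pvGet2 matrix i j) =
      pvSpec matrix m (m-1-i) j := by
  have hd : m-1-i = (m-1-(i+1))+1 := by omega
  rw [hd]
  rw [show pvSpec matrix m ((m-1-(i+1))+1) j =
    (if j = 0 then pvGet2 matrix (m-1-((m-1-(i+1))+1)) 0
     else if pvGet2 matrix (m-1-((m-1-(i+1))+1)) j = 1 ∧ 0 < pvSpec matrix m (m-1-(i+1)) (j-1) then
       pvSpec matrix m (m-1-(i+1)) (j-1) + 1
     else pvGet2 matrix (m-1-((m-1-(i+1))+1)) j) from rfl]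
  have hidx : m-1-((m-1-(i+1))+1) = i := by omega
  rw [hidx, ← hprev, if_neg (show ¬ j = 0 by omega)]

theorem pvWalkUp_og (matrix bl0 : List (List Int)) (m c : Nat)
    (HP : ∀ i j, i < m → j < c → (pvOg bl0 i j).isSome = true) :
    ∀ (i j : Nat) (prev : Int) (g : List (List Int)), pvShapeEq g bl0 →
    i + 1 < m → 1 ≤ j →
    prev = pvSpec matrix m (m-1-(i+1)) (j-1) →
    pvShapeEq (pvWalkUp matrix c i j prev g) bl0 ∧
    ∀ i' j', pvOg (pvWalkUp matrix c i j prev g) i' j' =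
      if i' ≤ i ∧ j ≤ j' ∧ j' < c ∧ i' + j' = i + j then some (pvSpec matrix m (m-1-i') j')
      else pvOg g i' j' := by
  intro i
  induction i with
  | zero =>
    intro j prev g hshg him hj1 hprev
    by_cases hjc : j < c
    · have hred : pvWalkUp matrix c 0 j prev g =
        pvSet2 g 0 j (if pvGet2 matrix 0 j = 1 ∧ 0 < prev then prev + 1 else pvGet2 matrix 0 j) := by
        rw [pvWalkUp]; simp [hjc]
      have hv := pvVal_spec matrix m 0 j prev him hj1 hprev
      have hsome : (pvOg g 0 j).isSome = true := by
        rw [pvIsSome_of_shape hshg]; exact HP 0 j (by omega) hjc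
      rw [hred, hv]
      refine ⟨pvShapeEq_trans (pvShapeEq_set2 _ _ _ _) hshg, fun i' j' => ?_⟩
      rw [pvOg_set2]
      simp only [hsome, and_true]
      by_cases hA : i' = 0 ∧ j' = j
      · obtain ⟨e1, e2⟩ := hA; subst e1; subst e2
        rw [if_pos ⟨rfl, rfl⟩, if_pos (by omega)]
      · rw [if_neg hA, if_neg (by omega)]
    · have hred : pvWalkUp matrix c 0 j prev g = g := by rw [pvWalkUp]; simp [hjc]
      rw [hred]
      exact ⟨hshg, fun i' j' => by rw [if_neg (by omega)]⟩
  | succ i' ih =>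
    intro j prev g hshg him hj1 hprev
    by_cases hjc : j < c
    · have hv := pvVal_spec matrix m (i'+1) j prev him hj1 hprev
      have hred : pvWalkUp matrix c (i'+1) j prev g =
        pvWalkUp matrix c i' (j+1)
          (if pvGet2 matrix (i'+1) j = 1 ∧ 0 < prev then prev + 1 else pvGet2 matrix (i'+1) j)
          (pvSet2 g (i'+1) j
            (if pvGet2 matrix (i'+1) j = 1 ∧ 0 < prev then prev + 1 else pvGet2 matrix (i'+1) j)) := by
        rw [pvWalkUp]; simp [hjc]
      set v := if pvGet2 matrix (i'+1) j = 1 ∧ 0 < prev then prev + 1 else pvGet2 matrix (i'+1) j with hvdef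
      have hsome : (pvOg g (i'+1) j).isSome = true := by
        rw [pvIsSome_of_shape hshg]; exact HP (i'+1) j (by omega) hjc
      have hsh2 : pvShapeEq (pvSet2 g (i'+1) j v) bl0 :=
        pvShapeEq_trans (pvShapeEq_set2 _ _ _ _) hshg
      obtain ⟨rs, rog⟩ := ih (j+1) v (pvSet2 g (i'+1) j v) hsh2 (by omega) (by omega) hv
      rw [hred]
      refine ⟨rs, fun i'' j'' => ?_⟩
      rw [rog, pvOg_set2]
      simp only [hsome, and_true]
      by_cases hA1 : i'' ≤ i' ∧ j + 1 ≤ j'' ∧ j'' < c ∧ i'' + j'' = i' + (j+1)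
      · rw [if_pos hA1, if_pos (by omega)]
      · rw [if_neg hA1]
        by_cases hA2 : i'' = i' + 1 ∧ j'' = j
        · obtain ⟨e1, e2⟩ := hA2; subst e1; subst e2
          rw [if_pos ⟨rfl, rfl⟩, if_pos (by omega), hv]
        · rw [if_neg hA2, if_neg (by omega)]
    · have hred : pvWalkUp matrix c (i'+1) j prev g = g := by rw [pvWalkUp]; simp [hjc]
      rw [hred]
      exact ⟨hshg, fun i' j' => by rw [if_neg (by omega)]⟩

theorem pvStartWalk_og (matrix bl0 : List (List Int)) (m c : Nat)
    (HP : ∀ i j, i < m → j < c → (pvOg bl0 i j).isSome = true)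
    (i0 j0 : Nat) (hi0 : i0 < m) (hb : i0 = m - 1 ∨ j0 = 0) (hj0 : j0 < c)
    (g : List (List Int)) (hsh : pvShapeEq g bl0) :
    pvShapeEq (pvStartWalk matrix c g i0 j0) bl0 ∧
    ∀ i' j', pvOg (pvStartWalk matrix c g i0 j0) i' j' =
      if i' ≤ i0 ∧ j0 ≤ j' ∧ j' < c ∧ i' + j' = i0 + j0 then some (pvSpec matrix m (m-1-i') j')
      else pvOg g i' j' := by
  have hprev : pvGet2 matrix i0 j0 = pvSpec matrix m (m-1-i0) j0 := by
    by_cases hbm : i0 = m - 1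
    · have hd : m - 1 - i0 = 0 := by omega
      rw [hd, show pvSpec matrix m 0 j0 = pvGet2 matrix (m-1) j0 from rfl, ← hbm]
    · have hb0 : j0 = 0 := by tauto
      subst hb0
      have hd : m - 1 - i0 = (m - 1 - i0 - 1) + 1 := by omega
      rw [hd, show pvSpec matrix m ((m-1-i0-1)+1) 0 = pvGet2 matrix (m-1-((m-1-i0-1)+1)) 0 from rfl]
      congr 2
      omega
  cases i0 with
  | zero =>
    have hred : pvStartWalk matrix c g 0 j0 = pvSet2 g 0 j0 (pvGet2 matrix 0 j0) := rfl
    have hsome : (pvOg g 0 j0).isSome = true := by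
      rw [pvIsSome_of_shape hsh]; exact HP 0 j0 hi0 hj0
    rw [hred, hprev]
    refine ⟨pvShapeEq_trans (pvShapeEq_set2 _ _ _ _) hsh, fun i' j' => ?_⟩
    rw [pvOg_set2]
    simp only [hsome, and_true]
    by_cases hA : i' = 0 ∧ j' = j0
    · obtain ⟨e1, e2⟩ := hA; subst e1; subst e2
      rw [if_pos ⟨rfl, rfl⟩, if_pos (by omega)]
    · rw [if_neg hA, if_neg (by omega)]
  | succ i =>
    have hred : pvStartWalk matrix c g (i+1) j0 =
      pvWalkUp matrix c i (j0+1) (pvGet2 matrix (i+1) j0)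
        (pvSet2 g (i+1) j0 (pvGet2 matrix (i+1) j0)) := rfl
    have hsome : (pvOg g (i+1) j0).isSome = true := by
      rw [pvIsSome_of_shape hsh]; exact HP (i+1) j0 hi0 hj0
    have hsh2 : pvShapeEq (pvSet2 g (i+1) j0 (pvGet2 matrix (i+1) j0)) bl0 :=
      pvShapeEq_trans (pvShapeEq_set2 _ _ _ _) hsh
    obtain ⟨rs, rog⟩ := pvWalkUp_og matrix bl0 m c HP i (j0+1) (pvGet2 matrix (i+1) j0)
      (pvSet2 g (i+1) j0 (pvGet2 matrix (i+1) j0)) hsh2 hi0 (by omega) hprev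
    rw [hred]
    refine ⟨rs, fun i'' j'' => ?_⟩
    rw [rog, pvOg_set2]
    simp only [hsome, and_true]
    by_cases hA1 : i'' ≤ i ∧ j0 + 1 ≤ j'' ∧ j'' < c ∧ i'' + j'' = i + (j0+1)
    · rw [if_pos hA1, if_pos (by omega)]
    · rw [if_neg hA1]
      by_cases hA2 : i'' = i + 1 ∧ j'' = j0
      · obtain ⟨e1, e2⟩ := hA2; subst e1; subst e2
        rw [if_pos ⟨rfl, rfl⟩, if_pos (by omega), hprev]
      · rw [if_neg hA2, if_neg (by omega)]

theorem pvB_fold1 (matrix bl0 : List (List Int)) (m c : Nat)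
    (HP : ∀ i j, i < m → j < c → (pvOg bl0 i j).isSome = true)
    (hm0 : 0 < m)
    (n : Nat) (hn : n ≤ c) (g : List (List Int)) (hsh : pvShapeEq g bl0) :
    pvShapeEq ((List.range n).foldl (fun bl j0 => pvStartWalk matrix c bl (m-1) j0) g) bl0 ∧
    ∀ i j, pvOg ((List.range n).foldl (fun bl j0 => pvStartWalk matrix c bl (m-1) j0) g) i j =
      if i < m ∧ j < c ∧ m - 1 ≤ i + j ∧ i + j - (m-1) < n then some (pvSpec matrix m (m-1-i) j)
      else pvOg g i j := by
  induction n with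
  | zero => exact ⟨hsh, fun i j => by rw [if_neg (by omega)]; rfl⟩
  | succ n ih =>
    obtain ⟨ihs, ihog⟩ := ih (by omega)
    rw [List.range_succ, List.foldl_append, List.foldl_cons, List.foldl_nil]
    obtain ⟨rs, rog⟩ := pvStartWalk_og matrix bl0 m c HP (m-1) n (by omega) (Or.inl rfl) (by omega)
      ((List.range n).foldl (fun bl j0 => pvStartWalk matrix c bl (m-1) j0) g) ihs
    refine ⟨rs, fun i j => ?_⟩
    rw [rog, ihog]
    by_cases hA1 : i ≤ m - 1 ∧ n ≤ j ∧ j < c ∧ i + j = m - 1 + n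
    · rw [if_pos hA1, if_pos (by omega)]
    · rw [if_neg hA1]
      by_cases hA2 : i < m ∧ j < c ∧ m - 1 ≤ i + j ∧ i + j - (m-1) < n
      · rw [if_pos hA2, if_pos (by omega)]
      · rw [if_neg hA2, if_neg (by omega)]

theorem pvB_fold2 (matrix bl0 : List (List Int)) (m c : Nat)
    (HP : ∀ i j, i < m → j < c → (pvOg bl0 i j).isSome = true)
    (hc0 : 0 < c)
    (n : Nat) (hn : n ≤ m - 1) (g : List (List Int)) (hsh : pvShapeEq g bl0) :
    pvShapeEq ((List.range n).foldl (fun bl i0 => pvStartWalk matrix c bl i0 0) g) bl0 ∧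
    ∀ i j, pvOg ((List.range n).foldl (fun bl i0 => pvStartWalk matrix c bl i0 0) g) i j =
      if i + j < n ∧ j < c then some (pvSpec matrix m (m-1-i) j)
      else pvOg g i j := by
  induction n with
  | zero => exact ⟨hsh, fun i j => by rw [if_neg (by omega)]; rfl⟩
  | succ n ih =>
    obtain ⟨ihs, ihog⟩ := ih (by omega)
    rw [List.range_succ, List.foldl_append, List.foldl_cons, List.foldl_nil]
    obtain ⟨rs, rog⟩ := pvStartWalk_og matrix bl0 m c HP n 0 (by omega) (Or.inr rfl) hc0
      ((List.range n).foldl (fun bl i0 => pvStartWalk matrix c bl i0 0) g) ihs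
    refine ⟨rs, fun i j => ?_⟩
    rw [rog, ihog]
    by_cases hA1 : i ≤ n ∧ 0 ≤ j ∧ j < c ∧ i + j = n + 0
    · rw [if_pos hA1, if_pos (by omega)]
    · rw [if_neg hA1]
      by_cases hA2 : i + j < n ∧ j < c
      · rw [if_pos hA2, if_pos (by omega)]
      · rw [if_neg hA2, if_neg (by omega)]

-- ===== VERDICT (by name: the statement is the Claim_ definition above) =====
theorem traverse_from_bottom_left_spec : Claim_equal_traverse_from_bottom_left := by
  intro matrix bl0 _hdom hpre
  unfold Spec_traverse_from_bottom_left
  set m := matrix.length with hm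
  set c := (matrix.headD []).length with hc
  by_cases hm0 : m = 0
  · have hmnil : matrix = [] := List.length_eq_zero_iff.mp hm0
    subst hmnil
    rfl
  by_cases hc0 : c = 0
  · have hA : traverse_from_bottom_left matrix bl0 = bl0 := by
      have hrow : pvRowA matrix m c = fun (g : List (List Int)) (_ : Nat) => g := by
        funext g i
        unfold pvRowA
        rw [hc0]
        rfl
      rw [show traverse_from_bottom_left matrix bl0 =
        (List.range m).reverse.foldl (pvRowA matrix m c) bl0 from rfl, hrow]
      exact pvFoldl_const _ _
    have hB : traverse_from_bottom_left_alt matrix bl0 = bl0 := by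
      rw [show traverse_from_bottom_left_alt matrix bl0 =
        (if m = 0 then bl0 else if c = 0 then bl0 else
          (List.range (m-1)).foldl (fun bl i0 => pvStartWalk matrix c bl i0 0)
            ((List.range c).foldl (fun bl j0 => pvStartWalk matrix c bl (m-1) j0) bl0)) from rfl]
      rw [if_neg hm0, if_pos hc0]
    rw [hA, hB]
  · rcases hpre with hnil | hcz | ⟨hmrows, hlen, hblrows⟩
    · exact absurd (by rw [hm, hnil]; rfl : m = 0) hm0
    · exact absurd (by rw [hc, hcz] : c = 0) hc0
    have HP : ∀ i j, i < m → j < c → (pvOg bl0 i j).isSome = true := by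
      intro i j him hjc
      have hil : i < bl0.length := by omega
      have hmem : bl0[i] ∈ bl0.take m := by
        have hsome : (bl0.take m)[i]? = some bl0[i] := by
          rw [List.getElem?_take_of_lt him]
          exact List.getElem?_eq_getElem hil
        exact List.mem_of_getElem? hsome
      have hrl := hblrows _ hmem
      unfold pvOg
      rw [List.getElem?_eq_getElem hil]
      simp only [Option.bind_some]
      rw [List.getElem?_eq_getElem (show j < bl0[i].length by omega)]
      rfl
    obtain ⟨hAs, hAog⟩ := pvA_og matrix bl0 m c HP m le_rfl bl0 (pvShapeEq_refl bl0)
      (fun i j h1 h2 _ => absurd h2 (by omega))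
    obtain ⟨h1s, h1og⟩ := pvB_fold1 matrix bl0 m c HP (by omega) c le_rfl bl0 (pvShapeEq_refl bl0)
    obtain ⟨h2s, h2og⟩ := pvB_fold2 matrix bl0 m c HP (by omega) (m-1) le_rfl _ h1s
    have hAdef : traverse_from_bottom_left matrix bl0 =
      (List.range m).reverse.foldl (pvRowA matrix m c) bl0 := rfl
    have hBdef : traverse_from_bottom_left_alt matrix bl0 =
      (List.range (m-1)).foldl (fun bl i0 => pvStartWalk matrix c bl i0 0)
        ((List.range c).foldl (fun bl j0 => pvStartWalk matrix c bl (m-1) j0) bl0) := by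
      rw [show traverse_from_bottom_left_alt matrix bl0 =
        (if m = 0 then bl0 else if c = 0 then bl0 else
          (List.range (m-1)).foldl (fun bl i0 => pvStartWalk matrix c bl i0 0)
            ((List.range c).foldl (fun bl j0 => pvStartWalk matrix c bl (m-1) j0) bl0)) from rfl]
      rw [if_neg hm0, if_neg hc0]
    rw [hAdef, hBdef]
    apply pvGrid_ext (pvShapeEq_trans hAs (pvShapeEq_symm h2s))
    intro i j
    rw [hAog, h2og, h1og]
    by_cases h1 : i < m ∧ j < c
    · rw [if_pos h1]
      by_cases h2 : i + j < m - 1 ∧ j < c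
      · rw [if_pos h2]
      · rw [if_neg h2, if_pos (by omega)]
    · rw [if_neg h1, if_neg (by omega), if_neg (by omega)]
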